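-- pv_equiv track=rewrite | github.com/leebird/bionlp17 | src/feature_filter.py | get_feature_by_group_list
-- ===== SOURCE A (Python) =====
-- def get_feature_by_group_list(features, feature_groups):
--     result = []
--     for feat in features:
--         for group in feature_groups:
--             if feat.startswith(group):
--                 result.append(feat)
--                 break
--     return result
-- ===== SOURCE B (Python) =====
-- def get_feature_by_group_list(features, feature_groups):
--     groups = set(feature_groups)
--     lengths = sorted({len(g) for g in feature_groups})
--     return [f for f in features
--             if any(L <= len(f) and f[:L] in groups for L in lengths)]
-- ===== Notes on version B (the rewrite author's own statement) =====
-- stated objective: faster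
-- what changed: B hashes the groups into a set and precomputes the sorted distinct group lengths, then keeps each feature (via a list comprehension) if any length-L prefix of it is in the set, so the per-feature scan over all groups disappears.
import Mathlib
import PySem

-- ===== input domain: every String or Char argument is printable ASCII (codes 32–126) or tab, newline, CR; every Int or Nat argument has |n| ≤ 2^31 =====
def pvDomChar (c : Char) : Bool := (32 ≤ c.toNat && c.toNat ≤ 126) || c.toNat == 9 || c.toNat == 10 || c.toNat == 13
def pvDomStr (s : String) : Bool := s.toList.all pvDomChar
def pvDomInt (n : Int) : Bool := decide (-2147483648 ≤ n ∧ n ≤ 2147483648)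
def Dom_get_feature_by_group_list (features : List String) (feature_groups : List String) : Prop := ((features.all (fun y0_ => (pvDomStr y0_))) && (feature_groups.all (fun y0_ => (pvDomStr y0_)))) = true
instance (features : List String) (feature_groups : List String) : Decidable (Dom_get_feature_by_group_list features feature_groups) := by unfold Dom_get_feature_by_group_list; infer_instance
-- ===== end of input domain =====

-- B replaces A's per-feature scan over all groups by a set of groups probed only at the distinct group lengths (faster when there are many groups).

-- ===== PORT A =====
-- A's inner 'for group in feature_groups: if feat.startswith(group): append; break'
def pvAInner (feat : String) (groups : List String) : Bool :=
  match groups with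
  | [] => false
  | g :: rest => if PySem.Str.startswith feat g then true else pvAInner feat rest

def get_feature_by_group_list (features : List String) (feature_groups : List String) : List String :=
  features.foldl (fun result feat =>
    if pvAInner feat feature_groups then result ++ [feat] else result) []

-- ===== PORT B =====
def get_feature_by_group_list_alt (features : List String) (feature_groups : List String) : List String :=
  let groups : PySem.Set String := PySem.Set.ofList feature_groups
  let lengths : List Int :=
    PySem.List.sorted (PySem.Set.ofList (feature_groups.map (fun g => PySem.Str.len g))) (fun x => x) false
  features.filter (fun f =>
    lengths.any (fun L =>
      decide (L ≤ PySem.Str.len f) && PySem.Set.contains groups (PySem.Str.slice f none (some L))))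

-- ===== PRECONDITION & SPEC =====
def Spec_get_feature_by_group_list (features : List String) (feature_groups : List String) (out : List String) : Prop := out = get_feature_by_group_list_alt features feature_groups
instance (features : List String) (feature_groups : List String) (out : List String) : Decidable (Spec_get_feature_by_group_list features feature_groups out) := by unfold Spec_get_feature_by_group_list; infer_instance

-- ===== CLAIM (what is proved, stated in full; the proofs are below) =====
def Claim_equal_get_feature_by_group_list : Prop := ∀ (features : List String) (feature_groups : List String), Dom_get_feature_by_group_list features feature_groups → Spec_get_feature_by_group_list features feature_groups (get_feature_by_group_list features feature_groups)

-- ===== LEMMAS AND PROOFS =====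

theorem pvAInner_iff (feat : String) (groups : List String) :
    pvAInner feat groups = true ↔ ∃ g ∈ groups, g.toList <+: feat.toList := by
  induction groups with
  | nil => simp [pvAInner]
  | cons g rest ih =>
      simp only [pvAInner]
      by_cases h : PySem.Str.startswith feat g = true
      · rw [if_pos h]
        simp only [true_iff]
        refine ⟨g, List.mem_cons_self, ?_⟩
        rw [PySem.Str.startswith_eq] at h
        exact (PySem.Chars.startswith_iff _ _).mp h
      · rw [if_neg h, ih]
        constructor
        · rintro ⟨x, hx, hp⟩; exact ⟨x, List.mem_cons_of_mem _ hx, hp⟩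
        · rintro ⟨x, hx, hp⟩
          rcases List.mem_cons.mp hx with rfl | hx'
          · exact absurd (by rw [PySem.Str.startswith_eq]; exact (PySem.Chars.startswith_iff _ _).mpr hp) h
          · exact ⟨x, hx', hp⟩

-- B's per-feature test, characterised: some admitted length L gives a prefix of f lying in the group set
theorem pvBCond_iff (f : String) (feature_groups : List String) :
    ((PySem.List.sorted (PySem.Set.ofList (feature_groups.map (fun g => PySem.Str.len g))) (fun x => x) false).any
      (fun L => decide (L ≤ PySem.Str.len f) && PySem.Set.contains (PySem.Set.ofList feature_groups) (PySem.Str.slice f none (some L))) = true)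
    ↔ ∃ g ∈ feature_groups, g.toList <+: f.toList := by
  rw [List.any_eq_true]
  constructor
  · rintro ⟨L, hL, hcond⟩
    rw [Bool.and_eq_true, decide_eq_true_iff] at hcond
    obtain ⟨hle, hmem⟩ := hcond
    rw [PySem.Set.contains_iff, PySem.Set.mem_ofList] at hmem
    -- L is the length of some group, hence 0 ≤ L
    rw [PySem.List.mem_sorted, PySem.Set.mem_ofList, List.mem_map] at hL
    obtain ⟨g0, _, rfl⟩ := hL
    refine ⟨PySem.Str.slice f none (some (PySem.Str.len g0)), hmem, ?_⟩
    have : (PySem.Str.slice f none (some (PySem.Str.len g0))).toList = f.toList.take (PySem.Str.len g0).toNat := by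
      simp [PySem.Str.toList_slice]
    rw [this]
    exact List.take_prefix _ _
  · rintro ⟨g, hg, hp⟩
    refine ⟨(g.toList.length : Int), ?_, ?_⟩
    · rw [PySem.List.mem_sorted, PySem.Set.mem_ofList, List.mem_map]
      exact ⟨g, hg, by simp [PySem.Str.len_eq]⟩
    · rw [Bool.and_eq_true, decide_eq_true_iff]
      constructor
      · have := hp.length_le
        simp only [PySem.Str.len_eq]
        omega
      · have hsl : PySem.Str.slice f none (some (g.toList.length : Int)) = g := by
          apply String.ext
          show (PySem.Str.slice f none (some (g.toList.length : Int))).toList = g.toList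
          rw [PySem.Str.toList_slice, PySem.Chars.slice_eq_listSlice, PySem.List.slice_to_natCast]
          exact (List.prefix_iff_eq_take.mp hp).symm
        rw [hsl, PySem.Set.contains_iff, PySem.Set.mem_ofList]
        exact hg

-- ===== VERDICT (by name: the statement is the Claim_ definition above) =====
theorem get_feature_by_group_list_spec : Claim_equal_get_feature_by_group_list := by
  intro features feature_groups _
  unfold Spec_get_feature_by_group_list get_feature_by_group_list get_feature_by_group_list_alt
  rw [PySem.List.foldl_append_if_eq_filter]
  simp only [List.nil_append]
  apply List.filter_congr
  intro f _
  rw [Bool.eq_iff_iff, pvAInner_iff, pvBCond_iff]
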